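-- pv_equiv track=rewrite | github.com/sy850811/PythonBasics | Largest_Row_or_Column.py | findLargestColumn
-- ===== SOURCE A (Python) =====
-- def findLargestColumn(arr, nRows, mCols):
--     index = 0
--     maxSum = -2147483648
--     for j in range(mCols):
--         sum = 0
--         for i in range(len(arr)):
--             sum += arr[i][j]
--         if sum > maxSum:
--             maxSum = sum
--             index = j
--     return maxSum,index
-- ===== SOURCE B (Python) =====
-- def findLargestColumn(arr, nRows, mCols):
--     # accumulate column sums row-major, then select the max in a second pass
--     sums = [0] * mCols
--     for row in arr:
--         for j in range(mCols):
--             sums[j] += row[j]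
--     maxSum = -2147483648
--     index = 0
--     for j in range(mCols):
--         if sums[j] > maxSum:
--             maxSum = sums[j]
--             index = j
--     return maxSum, index
-- ===== Notes on version B (the rewrite author's own statement) =====
-- stated objective: alternative
-- what changed: B replaces A's column-major nested scan (recomputing each column sum with an inner pass over all rows) by a row-major accumulation into a sums array followed by a separate max-selection pass over sums.
import Mathlib
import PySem

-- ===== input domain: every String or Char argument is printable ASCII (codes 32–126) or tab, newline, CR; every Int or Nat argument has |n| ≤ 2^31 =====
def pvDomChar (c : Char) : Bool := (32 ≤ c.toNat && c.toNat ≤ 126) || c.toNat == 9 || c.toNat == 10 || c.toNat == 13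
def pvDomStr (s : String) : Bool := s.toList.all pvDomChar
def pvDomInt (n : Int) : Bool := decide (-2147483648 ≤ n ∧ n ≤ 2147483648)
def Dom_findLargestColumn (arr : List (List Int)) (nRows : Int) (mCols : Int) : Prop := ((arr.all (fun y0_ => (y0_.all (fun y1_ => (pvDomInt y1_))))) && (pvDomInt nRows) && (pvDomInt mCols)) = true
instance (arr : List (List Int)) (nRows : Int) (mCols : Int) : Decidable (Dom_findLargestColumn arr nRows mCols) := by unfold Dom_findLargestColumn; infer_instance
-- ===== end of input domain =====

-- B splits A's column-major nested scan into a row-major accumulation of column sums plus a separate selection pass (alternative decomposition, same cost).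


-- ===== PORT A =====
def findLargestColumn (arr : List (List Int)) (nRows : Int) (mCols : Int) : Int × Int :=
  (PySem.List.pyRange 0 mCols 1).foldl
    (fun (st : Int × Int) j =>
      let s : Int :=
        (PySem.List.pyRange 0 (arr.length : Int) 1).foldl
          (fun acc i => acc + PySem.List.pyGetD (PySem.List.pyGetD arr i []) j 0) 0
      if s > st.1 then (s, j) else st)
    (-2147483648, 0)

-- ===== PORT B =====
def findLargestColumn_alt (arr : List (List Int)) (nRows : Int) (mCols : Int) : Int × Int :=
  let sums0 : List Int := List.replicate mCols.toNat 0
  let sums : List Int :=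
    arr.foldl
      (fun s row =>
        (PySem.List.pyRange 0 mCols 1).foldl
          (fun s j => PySem.List.pySetD s j (PySem.List.pyGetD s j 0 + PySem.List.pyGetD row j 0)) s)
      sums0
  (PySem.List.pyRange 0 mCols 1).foldl
    (fun (st : Int × Int) j =>
      if PySem.List.pyGetD sums j 0 > st.1 then (PySem.List.pyGetD sums j 0, j) else st)
    (-2147483648, 0)

-- ===== PRECONDITION & SPEC =====
-- Pre_ excludes exactly the inputs where Python A raises IndexError: some row shorter than mCols.
def Pre_findLargestColumn (arr : List (List Int)) (nRows : Int) (mCols : Int) : Prop :=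
  ∀ row ∈ arr, mCols ≤ (row.length : Int)
instance (arr : List (List Int)) (nRows : Int) (mCols : Int) : Decidable (Pre_findLargestColumn arr nRows mCols) := by unfold Pre_findLargestColumn; infer_instance
def pvWitness_findLargestColumn : List (List Int) × Int × Int := ([[1, 2], [3, 4]], 2, 2)
def Spec_findLargestColumn (arr : List (List Int)) (nRows : Int) (mCols : Int) (out : Int × Int) : Prop := out = findLargestColumn_alt arr nRows mCols
instance (arr : List (List Int)) (nRows : Int) (mCols : Int) (out : Int × Int) : Decidable (Spec_findLargestColumn arr nRows mCols out) := by unfold Spec_findLargestColumn; infer_instance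

-- ===== CLAIM (what is proved, stated in full; the proofs are below) =====
def Claim_equal_findLargestColumn : Prop := ∀ (arr : List (List Int)) (nRows : Int) (mCols : Int), Dom_findLargestColumn arr nRows mCols → Pre_findLargestColumn arr nRows mCols → Spec_findLargestColumn arr nRows mCols (findLargestColumn arr nRows mCols)

-- ===== LEMMAS AND PROOFS =====

-- sum of column j over all rows (defaulting 0 out of range), the common value
def colSum (arr : List (List Int)) (j : Int) : Int :=
  (arr.map (fun row => PySem.List.pyGetD row j 0)).sum

-- A's inner loop computes colSum
theorem innerA_eq (arr : List (List Int)) (j : Int) :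
    (PySem.List.pyRange 0 (arr.length : Int) 1).foldl
      (fun acc i => acc + PySem.List.pyGetD (PySem.List.pyGetD arr i []) j 0) 0
      = colSum arr j := by
  rw [PySem.List.foldl_pyRange_zero_pyGetD' arr [] (fun acc row => acc + PySem.List.pyGetD row j 0) 0,
      PySem.List.foldl_add]
  simp [colSum]

-- the per-row accumulation step of B
def accRow (mCols : Int) (s row : List Int) : List Int :=
  (PySem.List.pyRange 0 mCols 1).foldl
    (fun s j => PySem.List.pySetD s j (PySem.List.pyGetD s j 0 + PySem.List.pyGetD row j 0)) s

theorem accRow_aux (mCols : Int) (row : List Int) :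
    ∀ (k : Nat) (a : Int) (s : List Int), 0 ≤ a → mCols - a ≤ (k : Int) → s.length = mCols.toNat →
      (((PySem.List.pyRange a mCols 1).foldl
          (fun s j => PySem.List.pySetD s j (PySem.List.pyGetD s j 0 + PySem.List.pyGetD row j 0)) s).length
        = mCols.toNat)
      ∧ ∀ j : Int, 0 ≤ j → j < mCols →
          PySem.List.pyGetD
            ((PySem.List.pyRange a mCols 1).foldl
              (fun s j => PySem.List.pySetD s j (PySem.List.pyGetD s j 0 + PySem.List.pyGetD row j 0)) s) j 0
          = if a ≤ j then PySem.List.pyGetD s j 0 + PySem.List.pyGetD row j 0 else PySem.List.pyGetD s j 0 := by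
  intro k
  induction k with
  | zero =>
    intro a s ha hk hs
    rw [PySem.List.pyRange_one_eq_nil (by omega)]
    refine ⟨hs, ?_⟩
    intro j _ hj
    simp only [List.foldl_nil]
    rw [if_neg (by omega)]
  | succ k ih =>
    intro a s ha hk hs
    by_cases hab : mCols ≤ a
    · rw [PySem.List.pyRange_one_eq_nil hab]
      refine ⟨hs, ?_⟩
      intro j _ hj
      simp only [List.foldl_nil]
      rw [if_neg (by omega)]
    · push Not at hab
      rw [PySem.List.pyRange_one_cons hab, List.foldl_cons]
      have hsetlen : (PySem.List.pySetD s a (PySem.List.pyGetD s a 0 + PySem.List.pyGetD row a 0)).length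
          = mCols.toNat := by
        rw [PySem.List.pySetD_of_nonneg (h := ha), List.length_set, hs]
      obtain ⟨hL, hG⟩ := ih (a + 1)
        (PySem.List.pySetD s a (PySem.List.pyGetD s a 0 + PySem.List.pyGetD row a 0))
        (by omega) (by omega) hsetlen
      refine ⟨hL, ?_⟩
      intro j h0 hj
      rw [hG j h0 hj]
      have halen : a.toNat < s.length := by omega
      have hjlen : j.toNat < s.length := by omega
      have hgs : ∀ m : Int, 0 ≤ m → m.toNat < s.length →
          PySem.List.pyGetD (PySem.List.pySetD s a (PySem.List.pyGetD s a 0 + PySem.List.pyGetD row a 0)) m 0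
          = if m = a then PySem.List.pyGetD s a 0 + PySem.List.pyGetD row a 0 else PySem.List.pyGetD s m 0 := by
        intro m hm hmlen
        rw [PySem.List.pySetD_of_nonneg (h := ha),
            PySem.List.pyGetD_eq_getElem _ _ hm (by simp; omega)]
        by_cases hma : m = a
        · subst hma
          rw [if_pos rfl, List.getElem_set_self]
        · rw [if_neg hma, List.getElem_set_ne (by omega),
              ← PySem.List.pyGetD_eq_getElem s (0:Int) hm (by omega)]
      by_cases hcase : a + 1 ≤ j
      · rw [if_pos hcase, if_pos (by omega), hgs j h0 hjlen, if_neg (by omega)]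
      · by_cases hja : j = a
        · subst hja
          rw [if_neg hcase, if_pos le_rfl, hgs j h0 hjlen, if_pos rfl]
        · rw [if_neg hcase, if_neg (by omega), hgs j h0 hjlen, if_neg hja]

theorem accRow_len (mCols : Int) (s row : List Int) (hs : s.length = mCols.toNat) :
    (accRow mCols s row).length = mCols.toNat := by
  exact (accRow_aux mCols row (mCols - 0).toNat 0 s le_rfl (by omega) hs).1

theorem accRow_get (mCols : Int) (s row : List Int) (hs : s.length = mCols.toNat)
    (j : Int) (h0 : 0 ≤ j) (hj : j < mCols) :
    PySem.List.pyGetD (accRow mCols s row) j 0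
      = PySem.List.pyGetD s j 0 + PySem.List.pyGetD row j 0 := by
  have h := (accRow_aux mCols row (mCols - 0).toNat 0 s le_rfl (by omega) hs).2 j h0 hj
  simpa [accRow, h0] using h

theorem sums_get (mCols : Int) (arr : List (List Int)) :
    ∀ (s : List Int), s.length = mCols.toNat →
      ∀ j : Int, 0 ≤ j → j < mCols →
        PySem.List.pyGetD (arr.foldl (accRow mCols) s) j 0 = PySem.List.pyGetD s j 0 + colSum arr j := by
  induction arr with
  | nil => intro s _ j _ _; simp [colSum]
  | cons row rest ih =>
    intro s hs j h0 hj
    simp only [List.foldl_cons]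
    rw [ih (accRow mCols s row) (accRow_len mCols s row hs) j h0 hj,
        accRow_get mCols s row hs j h0 hj]
    simp only [colSum, List.map_cons, List.sum_cons]
    ring

-- ===== VERDICT (by name: the statement is the Claim_ definition above) =====
theorem findLargestColumn_spec : Claim_equal_findLargestColumn := by
  intro arr nRows mCols _ _
  unfold Spec_findLargestColumn findLargestColumn findLargestColumn_alt
  simp only []
  rw [show (fun (s row : List Int) =>
        (PySem.List.pyRange 0 mCols 1).foldl
          (fun s j => PySem.List.pySetD s j (PySem.List.pyGetD s j 0 + PySem.List.pyGetD row j 0)) s)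
      = accRow mCols from rfl]
  apply PySem.List.foldl_congr_mem
  intro st j hj
  have hmem := (PySem.List.mem_pyRange_one).1 hj
  have hget : PySem.List.pyGetD (arr.foldl (accRow mCols) (List.replicate mCols.toNat 0)) j 0
      = colSum arr j := by
    rw [sums_get mCols arr (List.replicate mCols.toNat 0) (by simp) j hmem.1 hmem.2]
    have hz : PySem.List.pyGetD (List.replicate mCols.toNat (0 : Int)) j 0 = 0 := by
      rcases Int.eq_ofNat_of_zero_le hmem.1 with ⟨n, rfl⟩
      simp [PySem.List.pyGetD_natCast, List.getD_eq_getElem?_getD, List.getElem?_replicate]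
      split <;> rfl
    omega
  simp only [innerA_eq, hget]
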